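-- pv_equiv track=rewrite | github.com/TheNDCC/AdventCfCode | 2025/dia6/dia6.py | extract_problems
-- ===== SOURCE A (Python) =====
-- def is_separator_col(grid, col):
--     """Una columna separadora es aquella que contiene SOLO espacios."""
--     return all(row[col] == " " for row in grid)
--
-- def extract_problems(grid, width, height):
--     """Devuelve una lista de problemas. Cada problema es (columnas_izq, columnas_der)."""
--     problems = []
--     in_problem = False
--     start = None
--
--     for c in range(width):
--         sep = is_separator_col(grid, c)
--
--         if sep:
--             if in_problem:
--                 problems.append((start, c - 1))
--                 in_problem = False
--         else:
--             if not in_problem: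
--                 start = c
--                 in_problem = True
--
--     if in_problem:
--         problems.append((start, width - 1))
--
--     return problems
-- ===== SOURCE B (Python) =====
-- def extract_problems(grid, width, height):
--     """Devuelve una lista de problemas. Cada problema es (columnas_izq, columnas_der)."""
--     sep = [all(row[c] == " " for row in grid) for c in range(width)]
--     starts = [c for c, p, s in zip(range(width), [True] + sep, sep) if p and not s]
--     ends = [c for c, s, n in zip(range(width), sep, sep[1:] + [True]) if not s and n]
--     return list(zip(starts, ends))
-- ===== Notes on version B (the rewrite author's own statement) =====
-- stated objective: alternative
-- what changed: B replaces A's in_problem/start flag state machine with edge detection: it zips the separator mask with shifted copies of itself to list the True-to-False edges (run starts) and the False-to-True edges (run ends), then pairs the two boundary lists with zip.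
import Mathlib
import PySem

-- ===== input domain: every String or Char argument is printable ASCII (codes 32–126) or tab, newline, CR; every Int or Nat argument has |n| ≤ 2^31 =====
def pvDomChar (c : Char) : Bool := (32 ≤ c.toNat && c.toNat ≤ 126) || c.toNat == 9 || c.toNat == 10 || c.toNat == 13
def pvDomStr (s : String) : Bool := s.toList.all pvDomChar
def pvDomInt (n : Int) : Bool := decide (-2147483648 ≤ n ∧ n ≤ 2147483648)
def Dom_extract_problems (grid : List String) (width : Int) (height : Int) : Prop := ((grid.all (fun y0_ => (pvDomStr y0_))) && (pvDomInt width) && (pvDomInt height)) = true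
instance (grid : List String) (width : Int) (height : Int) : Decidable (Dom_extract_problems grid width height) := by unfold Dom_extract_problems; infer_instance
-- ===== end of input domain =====

-- B detects run boundaries by zipping the separator mask with shifted copies of itself
-- (a start is a True→False edge, an end a False→True edge) and pairs the two boundary
-- lists with zip, instead of A's in_problem/start flag state machine (objective: alternative).

-- ===== PORT A =====
-- is_separator_col: all(row[col] == " " for row in grid); an out-of-range row[col] (IndexError)
-- appears as pyGet? = none (≠ some ' '), excluded by Pre_ below.
def sepColA (grid : List String) (col : Int) : Bool :=
  grid.all (fun row => PySem.Str.pyGet? row col == some ' ')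

-- the body of A's 'for c in range(width)' loop; start=None is represented by the Int 0
-- (only read when in_problem = true, when it always holds a real start column)
def stepA (grid : List String) (st : List (Int × Int) × Bool × Int) (c : Int) :
    List (Int × Int) × Bool × Int :=
  let (problems, in_problem, start) := st
  if sepColA grid c then
    if in_problem then (problems ++ [(start, c - 1)], false, start)
    else (problems, in_problem, start)
  else
    if !in_problem then (problems, true, c)
    else (problems, in_problem, start)

def extract_problems (grid : List String) (width : Int) (height : Int) : List (Int × Int) :=
  let res := (PySem.List.pyRange 0 width 1).foldl (stepA grid) ([], false, 0)
  if res.2.1 then res.1 ++ [(res.2.2, width - 1)] else res.1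

-- ===== PORT B =====
def sepColB (grid : List String) (col : Int) : Bool :=
  grid.all (fun row => PySem.Str.pyGet? row col == some ' ')

-- zip(range(width), [True]+sep, sep) / zip(range(width), sep, sep[1:]+[True]):
-- Python's 3-ary zip is the nested binary zip (both truncate to the shortest);
-- sep[1:] on a list is exactly List.drop 1 here (nonnegative start, no step).
def extract_problems_alt (grid : List String) (width : Int) (height : Int) : List (Int × Int) :=
  let sep := (PySem.List.pyRange 0 width 1).map (sepColB grid)
  let starts := (List.zip (PySem.List.pyRange 0 width 1) (List.zip (true :: sep) sep)).filterMap
    (fun x => if x.2.1 && !x.2.2 then some x.1 else none)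
  let ends := (List.zip (PySem.List.pyRange 0 width 1) (List.zip sep (sep.drop 1 ++ [true]))).filterMap
    (fun x => if !x.2.1 && x.2.2 then some x.1 else none)
  List.zip starts ends

-- ===== PRECONDITION & SPEC =====
-- Pre_ is exactly the inputs on which Python A returns: A raises IndexError at a column c < width
-- when some row is too short at c and every earlier row has a space at c (all() short-circuits);
-- the column quantifier is capped at the longest row + 1, which is equivalent and keeps it cheap.
def pvMaxLen (grid : List String) : Int :=
  grid.foldr (fun r m => max (PySem.Str.len r) m) 0

def Pre_extract_problems (grid : List String) (width : Int) (height : Int) : Prop :=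
  ∀ c ∈ PySem.List.pyRange 0 (min width (pvMaxLen grid + 1)) 1,
    ∀ i ∈ List.range grid.length,
      PySem.Str.len (grid.getD i "") ≤ c →
        ∃ j ∈ List.range i, PySem.Str.pyGet? (grid.getD j "") c ≠ some ' '
instance (grid : List String) (width : Int) (height : Int) : Decidable (Pre_extract_problems grid width height) := by unfold Pre_extract_problems; infer_instance

def pvWitness_extract_problems : List String × Int × Int := (["ab", " b"], 2, 2)

def Spec_extract_problems (grid : List String) (width : Int) (height : Int) (out : List (Int × Int)) : Prop := out = extract_problems_alt grid width height
instance (grid : List String) (width : Int) (height : Int) (out : List (Int × Int)) : Decidable (Spec_extract_problems grid width height out) := by unfold Spec_extract_problems; infer_instance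

-- ===== CLAIM (what is proved, stated in full; the proofs are below) =====
def Claim_equal_extract_problems : Prop := ∀ (grid : List String) (width : Int) (height : Int), Dom_extract_problems grid width height → Pre_extract_problems grid width height → Spec_extract_problems grid width height (extract_problems grid width height)

-- ===== LEMMAS AND PROOFS =====

-- canonical form: the list of maximal non-separator runs of the mask, via run consumption
def takeRunB : List Bool → Nat × List Bool
  | [] => (0, [])
  | true :: rest => (0, true :: rest)
  | false :: rest => let p := takeRunB rest; (p.1 + 1, p.2)
theorem takeRunB_len : ∀ l : List Bool, (takeRunB l).2.length ≤ l.length := by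
  intro l
  induction l with
  | nil => simp [takeRunB]
  | cons b rest ih => cases b <;> simp [takeRunB] <;> omega
def scanRunsB : List Bool → Int → List (Int × Int)
  | [], _ => []
  | true :: rest, c => scanRunsB rest (c + 1)
  | false :: rest, c =>
    let p := takeRunB rest
    (c, c + (p.1 : Int)) :: scanRunsB p.2 (c + (p.1 : Int) + 1)
  termination_by l _ => l.length
  decreasing_by
    all_goals have := takeRunB_len rest
    all_goals simp
    all_goals omega
-- B's two boundary comprehensions, rephrased as structural recursions over the mask
def startsM : List Bool → Int → Bool → List Int
  | [], _, _ => []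
  | b :: bs, c, prev => (if prev && !b then [c] else []) ++ startsM bs (c + 1) b
def endsM : List Bool → Int → List Int
  | [], _ => []
  | [b], c => if !b then [c] else []
  | b :: b2 :: bs, c => (if !b && b2 then [c] else []) ++ endsM (b2 :: bs) (c + 1)

-- A's loop rephrased as structural recursion over the separator mask, tracking the column
def runA : List Bool → Int → (List (Int × Int) × Bool × Int) → List (Int × Int) × Bool × Int
  | [], _, st => st
  | b :: bs, c, (problems, in_problem, start) =>
    runA bs (c + 1)
      (if b then
        (if in_problem then (problems ++ [(start, c - 1)], false, start)
         else (problems, in_problem, start))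
       else
        (if !in_problem then (problems, true, c)
         else (problems, in_problem, start)))

theorem foldl_stepA_eq_runA (grid : List String) :
    ∀ (a b : Int) (st : List (Int × Int) × Bool × Int),
      (PySem.List.pyRange a b 1).foldl (stepA grid) st
        = runA ((PySem.List.pyRange a b 1).map (sepColA grid)) a st := by
  intro a b
  by_cases h : a < b
  · rw [PySem.List.pyRange_one_cons h]
    intro st
    obtain ⟨p, ip, s⟩ := st
    simp only [List.foldl_cons, List.map_cons, runA]
    rw [foldl_stepA_eq_runA grid (a + 1) b]
    simp [stepA]
  · rw [PySem.List.pyRange_one_eq_nil (by omega)]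
    intro st; rfl
  termination_by a b => (b - a).toNat
  decreasing_by omega

-- closing step at the end of A's loop: append the open problem if still inside one
def finishA (st : List (Int × Int) × Bool × Int) (e : Int) : List (Int × Int) :=
  if st.2.1 then st.1 ++ [(st.2.2, e)] else st.1

-- the two mutual loop invariants: P (currently outside a run) and Q (inside a run begun at s)
theorem runA_scan : ∀ (bs : List Bool) (a : Int) (acc : List (Int × Int)) (s : Int),
    (finishA (runA bs a (acc, false, s)) (a + (bs.length : Int) - 1) = acc ++ scanRunsB bs a) ∧
    (finishA (runA bs a (acc, true, s)) (a + (bs.length : Int) - 1)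
      = acc ++ (s, a + ((takeRunB bs).1 : Int) - 1) :: scanRunsB (takeRunB bs).2 (a + ((takeRunB bs).1 : Int))) := by
  intro bs
  induction bs with
  | nil =>
    intro a acc s
    constructor
    · simp [runA, finishA, scanRunsB]
    · simp [runA, finishA, takeRunB, scanRunsB]
  | cons b rest ih =>
    intro a acc s
    have e : a + (((rest.length : Int)) + 1) - 1 = (a + 1) + (rest.length : Int) - 1 := by ring
    cases b with
    | true =>
      constructor
      · have hP := (ih (a + 1) acc s).1
        simp only [runA, scanRunsB, List.length_cons, Bool.false_eq_true, if_false, reduceIte]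
        push_cast
        rw [e]
        exact hP
      · have hP := (ih (a + 1) (acc ++ [(s, a - 1)]) s).1
        simp only [runA, takeRunB, scanRunsB, List.length_cons, reduceIte]
        push_cast
        rw [e, hP]
        simp
    | false =>
      constructor
      · have hQ := (ih (a + 1) acc a).2
        simp only [runA, scanRunsB, takeRunB, List.length_cons, Bool.not_false, reduceIte]
        push_cast
        rw [e, hQ]
        congr 2
        · congr 1 <;> push_cast <;> ring
        · congr 1; push_cast; ring
      · have hQ := (ih (a + 1) acc s).2
        simp only [runA, takeRunB, List.length_cons, Bool.not_true, reduceIte]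
        push_cast
        rw [e, hQ]
        congr 2
        · congr 1; push_cast; ring
        · congr 1; push_cast; ring

theorem sepColA_eq_sepColB : sepColA = sepColB := rfl

theorem bridgeS : ∀ (sep : List Bool) (prev : Bool) (a : Int),
    (List.zip (PySem.List.pyRange a (a + (sep.length : Int)) 1) (List.zip (prev :: sep) sep)).filterMap
        (fun x => if x.2.1 && !x.2.2 then some x.1 else none)
      = startsM sep a prev := by
  intro sep
  induction sep with
  | nil => intro prev a; simp [startsM]
  | cons s rest ih =>
    intro prev a
    have hcons : PySem.List.pyRange a (a + ((rest.length : Int) + 1)) 1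
        = a :: PySem.List.pyRange (a + 1) ((a + 1) + (rest.length : Int)) 1 := by
      rw [PySem.List.pyRange_one_cons (by omega)]
      congr 1; ring_nf
    simp only [List.length_cons]
    push_cast
    rw [hcons]
    simp only [List.zip_cons_cons, List.filterMap_cons, startsM]
    rw [ih s (a + 1)]
    cases prev <;> cases s <;> simp

theorem zip_fst_snd {α β : Type} : ∀ (l : List (α × β)), List.zip (l.map Prod.fst) (l.map Prod.snd) = l := by
  intro l
  induction l with
  | nil => rfl
  | cons x xs ih => simp [ih]

theorem bridgeE : ∀ (sep : List Bool) (a : Int),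
    (List.zip (PySem.List.pyRange a (a + (sep.length : Int)) 1) (List.zip sep (sep.drop 1 ++ [true]))).filterMap
        (fun x => if !x.2.1 && x.2.2 then some x.1 else none)
      = endsM sep a := by
  intro sep
  induction sep with
  | nil => intro a; simp [endsM]
  | cons s rest ih =>
    intro a
    have hcons : PySem.List.pyRange a (a + ((rest.length : Int) + 1)) 1
        = a :: PySem.List.pyRange (a + 1) ((a + 1) + (rest.length : Int)) 1 := by
      rw [PySem.List.pyRange_one_cons (by omega)]
      congr 1; ring_nf
    simp only [List.length_cons]
    push_cast
    rw [hcons]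
    cases rest with
    | nil =>
      simp only [List.drop, List.nil_append, List.zip_cons_cons, List.length_nil]
      cases s <;> simp [endsM]
    | cons s2 r =>
      simp only [List.drop_succ_cons, List.drop_zero, List.cons_append, List.zip_cons_cons,
        List.filterMap_cons]
      have h2 := ih (a + 1)
      simp only [List.drop_succ_cons, List.drop_zero, List.length_cons] at h2 ⊢
      push_cast at h2 ⊢
      rw [h2]
      cases s <;> cases s2 <;> simp [endsM]

theorem startsM_scan : ∀ (bs : List Bool) (a : Int),
    (startsM bs a true = (scanRunsB bs a).map Prod.fst) ∧
    (startsM bs a false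
      = (scanRunsB (takeRunB bs).2 (a + ((takeRunB bs).1 : Int))).map Prod.fst) := by
  intro bs
  induction bs with
  | nil => intro a; constructor <;> simp [startsM, scanRunsB, takeRunB]
  | cons b rest ih =>
    intro a
    cases b with
    | true =>
      constructor
      · simp [startsM, scanRunsB, (ih (a + 1)).1]
      · simp [startsM, takeRunB, scanRunsB, (ih (a + 1)).1]
    | false =>
      rcases hk : takeRunB rest with ⟨k, p⟩
      have h := (ih (a + 1)).2
      rw [hk] at h
      constructor
      · simp only [startsM, scanRunsB, hk]
        rw [h, show a + 1 + (k : Int) = a + (k : Int) + 1 by ring]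
        simp
      · simp only [startsM, takeRunB, hk]
        rw [h]
        simp
        congr 1
        push_cast
        ring

theorem endsM_false : ∀ (rest : List Bool) (a : Int),
    endsM (false :: rest) a
      = (a + ((takeRunB rest).1 : Int)) :: endsM (takeRunB rest).2 (a + ((takeRunB rest).1 : Int) + 1) := by
  intro rest
  induction rest with
  | nil => intro a; simp [endsM, takeRunB]
  | cons b r ih =>
    intro a
    cases b with
    | true => simp [endsM, takeRunB]
    | false =>
      rcases hk : takeRunB r with ⟨k, p⟩
      have h := ih (a + 1)
      rw [hk] at h
      simp only [endsM, takeRunB, hk] at h ⊢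
      simp at h ⊢
      rw [h]
      congr 1
      · omega
      · congr 1
        omega

theorem endsM_scan : ∀ (bs : List Bool) (a : Int),
    endsM bs a = (scanRunsB bs a).map Prod.snd := by
  intro bs a
  induction bs, a using scanRunsB.induct with
  | case1 a => simp [endsM, scanRunsB]
  | case2 rest a ih =>
    simp only [scanRunsB]
    rw [← ih]
    cases rest <;> simp [endsM]
  | case3 rest a p ih =>
    have hp : p = takeRunB rest := rfl
    rw [hp] at ih
    rw [endsM_false]
    simp only [scanRunsB, List.map_cons]
    rw [ih]

-- ===== VERDICT (by name: the statement is the Claim_ definition above) =====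
theorem extract_problems_spec : Claim_equal_extract_problems := by
  intro grid width height _ _
  unfold Spec_extract_problems
  simp only [extract_problems, extract_problems_alt]
  rw [foldl_stepA_eq_runA, sepColA_eq_sepColB]
  by_cases hw : 0 < width
  · set sep := (PySem.List.pyRange 0 width 1).map (sepColB grid) with hsep
    have hlen : ((sep.length : Int)) = width := by
      rw [hsep]; simp [PySem.List.length_pyRange_one]; omega
    rw [show PySem.List.pyRange 0 width 1
          = PySem.List.pyRange 0 (0 + (sep.length : Int)) 1 by rw [hlen]; norm_num]
    rw [bridgeS, bridgeE, (startsM_scan sep 0).1, endsM_scan, zip_fst_snd]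
    have h := (runA_scan sep 0 [] 0).1
    rw [hlen, show (0 : Int) + width - 1 = width - 1 by ring] at h
    simpa [finishA] using h
  · rw [PySem.List.pyRange_one_eq_nil (by omega)]
    simp [runA]
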